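-- pv_equiv track=rewrite | github.com/zavarovkv/hse-ds-2020 | algorithms/substring_search/shortest_cycle.py | shortestCycle
-- ===== SOURCE A (Python) =====
-- def shortestCycle(cyclic_string):
--     if not cyclic_string:
--         return 0
--
--     nxt = [0] * len(cyclic_string)
--     for i in range(1, len(nxt)):
--         k = nxt[i - 1]
--         while True:
--             if cyclic_string[i] == cyclic_string[k]:
--                 nxt[i] = k + 1
--                 break
--             elif k == 0:
--                 nxt[i] = 0
--                 break
--             else:
--                 k = nxt[k - 1]
--
--     small_string = len(cyclic_string) - nxt[-1]
--
--     if len(cyclic_string) % small_string != 0: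
--         return len(cyclic_string)
--
--     return len(cyclic_string[0:small_string])
-- ===== SOURCE B (Python) =====
-- def shortestCycle(cyclic_string):
--     n = len(cyclic_string)
--     if n == 0:
--         return 0
--     # longest proper border found by direct comparison, scanning lengths downward
--     b = n - 1
--     while b > 0 and cyclic_string[:b] != cyclic_string[n - b:]:
--         b -= 1
--     p = n - b
--     return p if n % p == 0 else n
-- ===== Notes on version B (the rewrite author's own statement) =====
-- stated objective: alternative
-- what changed: Replaces the KMP failure-array construction (per-character nested failure-link loop) by a direct downward scan for the longest proper border using whole prefix/suffix slice comparisons, then the same period formula.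
import Mathlib
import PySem

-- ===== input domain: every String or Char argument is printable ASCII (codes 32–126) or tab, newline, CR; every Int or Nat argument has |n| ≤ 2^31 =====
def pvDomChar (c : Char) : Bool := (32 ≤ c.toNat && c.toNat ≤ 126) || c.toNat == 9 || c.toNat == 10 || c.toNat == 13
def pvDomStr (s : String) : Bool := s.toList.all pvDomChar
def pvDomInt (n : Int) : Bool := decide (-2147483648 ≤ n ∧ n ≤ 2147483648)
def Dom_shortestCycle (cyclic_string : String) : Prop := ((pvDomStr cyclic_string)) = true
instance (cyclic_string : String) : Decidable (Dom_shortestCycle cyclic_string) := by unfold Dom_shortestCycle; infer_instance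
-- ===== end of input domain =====

-- B replaces A's KMP failure-array construction by a direct downward scan for the longest proper
-- border (whole prefix/suffix comparisons) followed by the same period formula; objective: alternative.

-- ===== PORT A =====
-- inner `while True` loop of A.  All Python ints involved are nonnegative and in range, so Nat
-- arithmetic and List.getD are exact here.  `k` strictly decreases along nxt-links, so any
-- fuel > k makes this loop exact (proved below); the outer loop passes fuel = len(cyclic_string).
def aWhile (cs : List Char) (nxt : List Nat) (i : Nat) : Nat → Nat → Nat
  | _, 0 => 0
  | k, fuel + 1 =>
    if cs.getD i ' ' = cs.getD k ' ' then k + 1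
    else if k = 0 then 0
    else aWhile cs nxt i (nxt.getD (k - 1) 0) fuel

-- `nxt = [0]*n` then `for i in range(1, n): nxt[i] = <while result>`
def buildNxt (cs : List Char) : List Nat :=
  (List.range' 1 (cs.length - 1)).foldl
    (fun nxt i => nxt.set i (aWhile cs nxt i (nxt.getD (i - 1) 0) cs.length))
    (List.replicate cs.length 0)

def shortestCycle (cyclic_string : String) : Int :=
  let cs := cyclic_string.toList
  if cs.isEmpty then 0
  else
    let nxt := buildNxt cs
    -- nxt[-1]: the list is nonempty here, so this is index n-1 (exact)
    let small := cs.length - nxt.getD (cs.length - 1) 0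
    if cs.length % small ≠ 0 then (cs.length : Int)
    else ((PySem.List.slice cs (some 0) (some (small : Int))).length : Int)

-- ===== PORT B =====
-- `while b > 0 and s[:b] != s[n-b:]: b -= 1` — the slice bounds are in [0, n], so take/drop are exact
def bFind (cs : List Char) : Nat → Nat
  | 0 => 0
  | b + 1 => if cs.take (b + 1) = cs.drop (cs.length - (b + 1)) then b + 1 else bFind cs b

def shortestCycle_alt (cyclic_string : String) : Int :=
  let cs := cyclic_string.toList
  let n := cs.length
  if n = 0 then 0
  else
    let b := bFind cs (n - 1)
    let p := n - b
    if n % p = 0 then (p : Int) else (n : Int)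

-- ===== PRECONDITION & SPEC =====
def Spec_shortestCycle (cyclic_string : String) (out : Int) : Prop := out = shortestCycle_alt cyclic_string
instance (cyclic_string : String) (out : Int) : Decidable (Spec_shortestCycle cyclic_string out) := by unfold Spec_shortestCycle; infer_instance

-- ===== CLAIM (what is proved, stated in full; the proofs are below) =====
def Claim_equal_shortestCycle : Prop := ∀ (cyclic_string : String), Dom_shortestCycle cyclic_string → Spec_shortestCycle cyclic_string (shortestCycle cyclic_string)

-- ===== LEMMAS AND PROOFS =====

-- `borderB cs m k`: k is a (proper) border length of the prefix of cs of length m, stated pointwise.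
def borderB (cs : List Char) (m k : Nat) : Bool :=
  decide (k < m) && (List.range k).all (fun j => cs.getD j ' ' == cs.getD (m - k + j) ' ')

theorem borderB_iff (cs : List Char) (m k : Nat) :
    borderB cs m k = true ↔ k < m ∧ ∀ j < k, cs.getD j ' ' = cs.getD (m - k + j) ' ' := by
  simp [borderB, List.all_eq_true, List.mem_range]

-- longest proper border of the prefix of length m
def fB (cs : List Char) (m : Nat) : Nat :=
  Nat.findGreatest (fun k => borderB cs m k = true) (m - 1)

theorem fB_lt (cs : List Char) (m : Nat) (h : 1 ≤ m) : fB cs m < m := by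
  have := Nat.findGreatest_le (P := fun k => borderB cs m k = true) (m - 1)
  unfold fB; omega

theorem borderB_zero (cs : List Char) (m : Nat) (h : 1 ≤ m) : borderB cs m 0 = true := by
  rw [borderB_iff]; exact ⟨h, by omega⟩

theorem fB_spec (cs : List Char) (m : Nat) (h : 1 ≤ m) : borderB cs m (fB cs m) = true :=
  Nat.findGreatest_spec (P := fun k => borderB cs m k = true) (m := 0)
    (Nat.zero_le _) (borderB_zero cs m h)

theorem fB_max (cs : List Char) (m k : Nat) (h : borderB cs m k = true) : k ≤ fB cs m := by
  have hk := (borderB_iff cs m k).1 h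
  exact Nat.le_findGreatest (by omega) h

-- if a and b are borders of the prefix of length m and b < a, then b is a border of the prefix of length a
theorem border_trans (cs : List Char) (m a b : Nat)
    (ha : borderB cs m a = true) (hb : borderB cs m b = true) (hba : b < a) :
    borderB cs a b = true := by
  rw [borderB_iff] at *
  obtain ⟨ham, ha⟩ := ha
  obtain ⟨hbm, hb⟩ := hb
  refine ⟨hba, fun j hj => ?_⟩
  have h1 : cs.getD (a - b + j) ' ' = cs.getD (m - a + (a - b + j)) ' ' := ha _ (by omega)
  have h2 : m - a + (a - b + j) = m - b + j := by omega
  rw [h2] at h1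
  rw [h1]
  exact hb j hj

-- extension: (k+1) is a border of the prefix of length m+1 iff k is a border of that of length m
-- and the characters at k and m agree
theorem border_ext (cs : List Char) (m k : Nat) :
    borderB cs (m + 1) (k + 1) = true ↔
      borderB cs m k = true ∧ cs.getD k ' ' = cs.getD m ' ' := by
  rw [borderB_iff, borderB_iff]
  constructor
  · rintro ⟨hk, h⟩
    have hkm : k < m := by omega
    refine ⟨⟨hkm, fun j hj => ?_⟩, ?_⟩
    · have := h j (by omega)
      have e : m + 1 - (k + 1) + j = m - k + j := by omega
      rwa [e] at this
    · have := h k (by omega)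
      have e : m + 1 - (k + 1) + k = m := by omega
      rwa [e] at this
  · rintro ⟨⟨hkm, h⟩, hc⟩
    refine ⟨by omega, fun j hj => ?_⟩
    have e : m + 1 - (k + 1) + j = m - k + j := by omega
    rw [e]
    rcases Nat.lt_or_ge j k with hjk | hjk
    · exact h j hjk
    · have hjk' : j = k := by omega
      have e2 : m - k + j = m := by omega
      rw [e2, hjk']; exact hc

-- spec-level form of A's inner while loop (failure-link chain), fuel-free
def wLoop (cs : List Char) (i : Nat) (k : Nat) : Nat :=
  if cs.getD i ' ' = cs.getD k ' ' then k + 1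
  else if _h : k = 0 then 0
  else wLoop cs i (fB cs k)
termination_by k
decreasing_by exact fB_lt _ _ (by omega)

theorem aWhile_eq_wLoop (cs : List Char) (nxt : List Nat) (i : Nat)
    (hn : ∀ j < i, nxt.getD j 0 = fB cs (j + 1)) :
    ∀ fuel k, k < i → k + 1 ≤ fuel → aWhile cs nxt i k fuel = wLoop cs i k := by
  intro fuel
  induction fuel with
  | zero => intro k _ h; omega
  | succ fuel ih =>
    intro k hki hfuel
    rw [aWhile, wLoop]
    by_cases hc : cs.getD i ' ' = cs.getD k ' '
    · rw [if_pos hc, if_pos hc]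
    · rw [if_neg hc, if_neg hc]
      by_cases hk0 : k = 0
      · rw [if_pos hk0, dif_pos hk0]
      · have hk1 : 1 ≤ k := by omega
        have hlink : nxt.getD (k - 1) 0 = fB cs k := by
          have := hn (k - 1) (by omega)
          have e : k - 1 + 1 = k := by omega
          rwa [e] at this
        have hflt : fB cs k < k := fB_lt cs k hk1
        rw [if_neg hk0, dif_neg hk0, hlink]
        exact ih (fB cs k) (by omega) (by omega)

-- the while loop started at a k that dominates every matching border computes the next failure value
theorem wLoop_spec (cs : List Char) (m : Nat) (hm : 1 ≤ m) :
    ∀ k, borderB cs m k = true →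
      (∀ j, borderB cs m j = true → cs.getD j ' ' = cs.getD m ' ' → j ≤ k) →
      wLoop cs m k = fB cs (m + 1) := by
  intro k
  induction k using Nat.strong_induction_on with
  | _ k ih =>
    intro hbk hdom
    rw [wLoop]
    by_cases hc : cs.getD m ' ' = cs.getD k ' '
    · -- match: result k+1; it is a border of m+1 and is maximal
      simp only [if_pos hc]
      have hb1 : borderB cs (m + 1) (k + 1) = true :=
        (border_ext cs m k).2 ⟨hbk, hc.symm⟩
      have hle : k + 1 ≤ fB cs (m + 1) := fB_max cs (m + 1) (k + 1) hb1
      have hge : fB cs (m + 1) ≤ k + 1 := by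
        rcases Nat.eq_zero_or_pos (fB cs (m + 1)) with h0 | hpos
        · omega
        · obtain ⟨j, hj⟩ : ∃ j, fB cs (m + 1) = j + 1 := ⟨fB cs (m + 1) - 1, by omega⟩
          have hbj := fB_spec cs (m + 1) (by omega)
          rw [hj] at hbj
          obtain ⟨hbjm, hcj⟩ := (border_ext cs m j).1 hbj
          have := hdom j hbjm hcj
          omega
      omega
    · by_cases hk0 : k = 0
      · -- no match at 0: no border of m+1 is positive
        simp only [if_neg hc, dif_pos hk0]
        rcases Nat.eq_zero_or_pos (fB cs (m + 1)) with h0 | hpos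
        · omega
        · exfalso
          obtain ⟨j, hj⟩ : ∃ j, fB cs (m + 1) = j + 1 := ⟨fB cs (m + 1) - 1, by omega⟩
          have hbj := fB_spec cs (m + 1) (by omega)
          rw [hj] at hbj
          obtain ⟨hbjm, hcj⟩ := (border_ext cs m j).1 hbj
          have := hdom j hbjm hcj
          subst hk0
          have : j = 0 := by omega
          subst this
          exact hc hcj.symm
      · -- follow the failure link
        simp only [if_neg hc, dif_neg hk0]
        have hk1 : 1 ≤ k := by omega
        have hbf : borderB cs m (fB cs k) = true := by
          have hbk' : borderB cs k (fB cs k) = true := fB_spec cs k hk1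
          -- a border of (prefix k) is a border of (prefix m) because k is a border of m:
          rw [borderB_iff] at hbk hbk' ⊢
          obtain ⟨hkm, hk⟩ := hbk
          obtain ⟨hfk, hf⟩ := hbk'
          refine ⟨by omega, fun j hj => ?_⟩
          have h1 : cs.getD j ' ' = cs.getD (k - fB cs k + j) ' ' := hf j hj
          have h2 : cs.getD (k - fB cs k + j) ' ' = cs.getD (m - k + (k - fB cs k + j)) ' ' :=
            hk _ (by omega)
          have e : m - k + (k - fB cs k + j) = m - fB cs k + j := by omega
          rw [e] at h2
          exact h1.trans h2
        refine ih (fB cs k) (fB_lt cs k hk1) hbf ?_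
        intro j hbj hcj
        have hjk : j ≤ k := hdom j hbj hcj
        have hjne : j ≠ k := by
          intro h; subst h; exact hc hcj.symm
        exact fB_max cs k j (border_trans cs m k j hbk hbj (by omega))

-- the fold that builds nxt: after processing range' 1 t, entry j holds fB cs (j+1) for j ≤ t
theorem buildNxt_fold (cs : List Char) (h1 : 1 ≤ cs.length) :
    ∀ t, t ≤ cs.length - 1 →
      ((List.range' 1 t).foldl
        (fun nxt i => nxt.set i (aWhile cs nxt i (nxt.getD (i - 1) 0) cs.length))
        (List.replicate cs.length 0)).length = cs.length ∧
      ∀ j < cs.length,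
        ((List.range' 1 t).foldl
          (fun nxt i => nxt.set i (aWhile cs nxt i (nxt.getD (i - 1) 0) cs.length))
          (List.replicate cs.length 0)).getD j 0 = if j ≤ t then fB cs (j + 1) else 0 := by
  intro t
  induction t with
  | zero =>
    intro _
    constructor
    · simp
    · intro j hj
      have hj0 : (List.replicate cs.length 0).getD j 0 = 0 := by
        simp [List.getD]
      rw [List.range'_zero, List.foldl_nil, hj0]
      have : fB cs 1 = 0 := by unfold fB; simp [Nat.findGreatest]
      by_cases hj' : j ≤ 0
      · have : j = 0 := by omega
        simp [this, ‹fB cs 1 = 0›]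
      · simp [hj']
  | succ t ih =>
    intro ht
    obtain ⟨hlen, hval⟩ := ih (by omega)
    have hrange : List.range' 1 (t + 1) = List.range' 1 t ++ [1 + 1 * t] := List.range'_concat
    have h1t : 1 + 1 * t = t + 1 := by omega
    rw [h1t] at hrange
    set nxt_t := (List.range' 1 t).foldl
        (fun nxt i => nxt.set i (aWhile cs nxt i (nxt.getD (i - 1) 0) cs.length))
        (List.replicate cs.length 0) with hnxt
    rw [hrange, List.foldl_append, List.foldl_cons, List.foldl_nil]
    have hprev : ∀ j < t + 1, nxt_t.getD j 0 = fB cs (j + 1) := by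
      intro j hj
      rw [hval j (by omega)]
      simp [Nat.lt_succ_iff.mp hj]
    -- the value written at index t+1
    have hk0 : nxt_t.getD (t + 1 - 1) 0 = fB cs (t + 1) := by
      have := hprev t (by omega)
      simpa using this
    have hflt : fB cs (t + 1) < t + 1 := fB_lt cs (t + 1) (by omega)
    have hvalnew : aWhile cs nxt_t (t + 1) (nxt_t.getD (t + 1 - 1) 0) cs.length
        = fB cs (t + 1 + 1) := by
      rw [hk0]
      rw [aWhile_eq_wLoop cs nxt_t (t + 1) hprev cs.length (fB cs (t + 1)) hflt (by omega)]
      refine wLoop_spec cs (t + 1) (by omega) (fB cs (t + 1)) (fB_spec cs (t + 1) (by omega))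
        (fun j hbj _ => fB_max cs (t + 1) j hbj)
    constructor
    · simpa [List.length_set] using hlen
    · intro j hj
      by_cases hje : j = t + 1
      · subst hje
        rw [hvalnew]
        have hset : (nxt_t.set (t + 1) (fB cs (t + 1 + 1))).getD (t + 1) 0 = fB cs (t + 1 + 1) := by
          rw [List.getD_eq_getElem?_getD, List.getElem?_set_self (by omega)]
          simp
        rw [hset]
        simp
      · have hgd : (nxt_t.set (t + 1) (aWhile cs nxt_t (t + 1) (nxt_t.getD (t + 1 - 1) 0) cs.length)).getD j 0
            = nxt_t.getD j 0 := by
          rw [List.getD_eq_getElem?_getD, List.getElem?_set_ne (by omega), ← List.getD_eq_getElem?_getD]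
        rw [hgd, hval j hj]
        by_cases hjt : j ≤ t
        · have hle : j ≤ t + 1 := by omega
          simp [hjt, hle]
        · have : ¬ j ≤ t + 1 := by omega
          simp [hjt, this]

theorem buildNxt_last (cs : List Char) (h1 : 1 ≤ cs.length) :
    (buildNxt cs).getD (cs.length - 1) 0 = fB cs cs.length := by
  obtain ⟨_, hval⟩ := buildNxt_fold cs h1 (cs.length - 1) (le_refl _)
  unfold buildNxt
  rw [hval (cs.length - 1) (by omega)]
  have e : cs.length - 1 + 1 = cs.length := by omega
  simp [e]

-- the take/drop border test used by B agrees with the pointwise borderB (for k < n)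
theorem take_drop_iff_border (cs : List Char) (k : Nat) (hk : k < cs.length) :
    (cs.take k = cs.drop (cs.length - k)) ↔
      (∀ j < k, cs.getD j ' ' = cs.getD (cs.length - k + j) ' ') := by
  constructor
  · intro he j hj
    have hj1 : j < cs.length := by omega
    have hj2 : cs.length - k + j < cs.length := by omega
    have h1 : (cs.take k)[j]'(by simp; omega) = cs[j]'hj1 := List.getElem_take
    have h2 : (cs.drop (cs.length - k))[j]'(by simp; omega) = cs[cs.length - k + j]'hj2 := by
      rw [List.getElem_drop]
    rw [List.getD_eq_getElem cs ' ' hj1, List.getD_eq_getElem cs ' ' hj2]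
    rw [← h1, ← h2]
    congr 1
  · intro hp
    apply List.ext_getElem
    · simp; omega
    · intro j hja hjb
      have hjk : j < k := by simp at hja; omega
      have hj1 : j < cs.length := by omega
      have hj2 : cs.length - k + j < cs.length := by omega
      have h1 : (cs.take k)[j]'hja = cs[j]'hj1 := List.getElem_take
      have h2 : (cs.drop (cs.length - k))[j]'hjb = cs[cs.length - k + j]'hj2 := by
        rw [List.getElem_drop]
      rw [h1, h2]
      have := hp j hjk
      rwa [List.getD_eq_getElem cs ' ' hj1, List.getD_eq_getElem cs ' ' hj2] at this

-- findGreatest only depends on the predicate below the bound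
theorem findGreatest_congr (P Q : Nat → Prop) [DecidablePred P] [DecidablePred Q] :
    ∀ t, (∀ j ≤ t, (P j ↔ Q j)) → Nat.findGreatest P t = Nat.findGreatest Q t := by
  intro t
  induction t with
  | zero => intro _; rfl
  | succ t ih =>
    intro h
    rw [Nat.findGreatest_succ, Nat.findGreatest_succ]
    by_cases hp : P (t + 1)
    · rw [if_pos hp, if_pos ((h (t + 1) (le_refl _)).1 hp)]
    · rw [if_neg hp, if_neg (fun hq => hp ((h (t + 1) (le_refl _)).2 hq))]
      exact ih (fun j hj => h j (by omega))

-- B's downward scan is findGreatest for the take/drop test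
theorem bFind_eq_findGreatest (cs : List Char) :
    ∀ b, bFind cs b = Nat.findGreatest (fun k => cs.take k = cs.drop (cs.length - k)) b := by
  intro b
  induction b with
  | zero => rfl
  | succ b ih =>
    rw [bFind, Nat.findGreatest_succ]
    by_cases h : cs.take (b + 1) = cs.drop (cs.length - (b + 1))
    · rw [if_pos h, if_pos h]
    · rw [if_neg h, if_neg h, ih]

theorem bFind_eq_fB (cs : List Char) (h1 : 1 ≤ cs.length) :
    bFind cs (cs.length - 1) = fB cs cs.length := by
  rw [bFind_eq_findGreatest]
  unfold fB
  apply findGreatest_congr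
  intro j hj
  rw [borderB_iff]
  have hjn : j < cs.length := by omega
  rw [take_drop_iff_border cs j hjn]
  constructor
  · intro h; exact ⟨hjn, h⟩
  · intro h; exact h.2

-- ===== VERDICT (by name: the statement is the Claim_ definition above) =====
theorem shortestCycle_spec : Claim_equal_shortestCycle := by
  unfold Claim_equal_shortestCycle Spec_shortestCycle
  intro s _
  unfold shortestCycle shortestCycle_alt
  by_cases hemp : s.toList.isEmpty
  · have : s.toList.length = 0 := by simpa [List.isEmpty_iff_length_eq_zero] using hemp
    simp [hemp, this]
  · have h1 : 1 ≤ s.toList.length := by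
      rcases Nat.eq_zero_or_pos s.toList.length with h | h
      · exact absurd (List.isEmpty_iff_length_eq_zero.2 h) hemp
      · omega
    have hne : ¬ s.toList.length = 0 := by omega
    simp only [hemp, hne, Bool.false_eq_true, if_false]
    set cs := s.toList with hcs
    set n := cs.length with hn
    have hlast : (buildNxt cs).getD (n - 1) 0 = fB cs n := buildNxt_last cs h1
    have hbf : bFind cs (n - 1) = fB cs n := bFind_eq_fB cs h1
    rw [hlast, hbf]
    have hflt : fB cs n < n := fB_lt cs n h1
    by_cases hmod : n % (n - fB cs n) = 0
    · simp only [hmod, if_pos, ne_eq, not_true_eq_false, if_false]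
      rw [PySem.List.slice_zero_start]
      rw [PySem.List.slice_to_natCast]
      simp [hn]
    · simp [hmod]
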